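-- pv_equiv track=rewrite | github.com/Naman4561/LSPBE-LD-RAG | src/lspbe/subsets.py | is_gold_centered_adjacency_easy
-- ===== SOURCE A (Python) =====
-- def is_gold_centered_adjacency_easy(segment_ids: set[int]) -> bool:
--     ordered = sorted(segment_ids)
--     if not ordered:
--         return False
--     for center in ordered:
--         if all(abs(center - other) <= 1 for other in ordered):
--             return True
--     return False
-- ===== SOURCE B (Python) =====
-- def is_gold_centered_adjacency_easy(segment_ids: set[int]) -> bool:
--     if not segment_ids:
--         return False
--     mn = min(segment_ids)
--     mx = max(segment_ids)
--     if mx - mn <= 1: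
--         return True
--     return mx - mn == 2 and (mn + 1) in segment_ids
-- ===== Notes on version B (the rewrite author's own statement) =====
-- stated objective: faster
-- what changed: Replaces the quadratic scan over the sorted list (each element tested against all others) with a single min/max pass: a valid center exists iff max-min<=1, or max-min==2 and min+1 is present.
import Mathlib
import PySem

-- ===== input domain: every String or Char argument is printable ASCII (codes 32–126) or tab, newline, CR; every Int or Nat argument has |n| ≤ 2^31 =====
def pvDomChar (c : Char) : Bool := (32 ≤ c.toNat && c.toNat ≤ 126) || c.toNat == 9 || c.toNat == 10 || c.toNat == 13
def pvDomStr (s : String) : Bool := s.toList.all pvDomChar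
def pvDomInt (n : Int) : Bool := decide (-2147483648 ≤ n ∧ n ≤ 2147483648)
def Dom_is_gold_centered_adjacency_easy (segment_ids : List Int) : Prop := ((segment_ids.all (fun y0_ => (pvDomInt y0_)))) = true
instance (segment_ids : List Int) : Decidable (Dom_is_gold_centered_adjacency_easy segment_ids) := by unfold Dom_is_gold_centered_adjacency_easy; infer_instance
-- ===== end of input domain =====

-- B replaces A's quadratic check (every element against all others, over the sorted list)
-- by a single min/max pass; objective: faster (asymptotic, O(n^2) -> O(n)).

-- ===== PORT A =====
def is_gold_centered_adjacency_easy (segment_ids : List Int) : Bool :=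
  let ordered := PySem.List.sorted segment_ids (fun x => x) false
  if ordered = [] then false
  else ordered.any (fun center => ordered.all (fun other => decide (|center - other| ≤ 1)))

-- ===== PORT B =====
def is_gold_centered_adjacency_easy_alt (segment_ids : List Int) : Bool :=
  match segment_ids with
  | [] => false
  | x :: xs =>
    let mn := xs.foldl min x       -- min(segment_ids)
    let mx := xs.foldl max x       -- max(segment_ids)
    if mx - mn ≤ 1 then true
    else decide (mx - mn = 2) && (x :: xs).contains (mn + 1)

-- ===== PRECONDITION & SPEC =====
def Spec_is_gold_centered_adjacency_easy (segment_ids : List Int) (out : Bool) : Prop := out = is_gold_centered_adjacency_easy_alt segment_ids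
instance (segment_ids : List Int) (out : Bool) : Decidable (Spec_is_gold_centered_adjacency_easy segment_ids out) := by unfold Spec_is_gold_centered_adjacency_easy; infer_instance

-- ===== CLAIM (what is proved, stated in full; the proofs are below) =====
def Claim_equal_is_gold_centered_adjacency_easy : Prop := ∀ (segment_ids : List Int), Dom_is_gold_centered_adjacency_easy segment_ids → Spec_is_gold_centered_adjacency_easy segment_ids (is_gold_centered_adjacency_easy segment_ids)

-- ===== LEMMAS AND PROOFS =====

-- A = true iff some element is within 1 of all elements.
theorem portA_iff (s : List Int) :
    is_gold_centered_adjacency_easy s = true ↔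
      ∃ c ∈ s, ∀ o ∈ s, |c - o| ≤ 1 := by
  by_cases h : s = []
  · subst h; simp [is_gold_centered_adjacency_easy]
  · have h' : PySem.List.sorted s (fun x => x) false ≠ [] :=
      fun hc => h ((PySem.List.sorted_eq_nil_iff s _ false).mp hc)
    simp [is_gold_centered_adjacency_easy, h', PySem.List.mem_sorted]

theorem portB_iff (x : Int) (xs : List Int) :
    is_gold_centered_adjacency_easy_alt (x :: xs) = true ↔
      (xs.foldl max x - xs.foldl min x ≤ 1 ∨
       (xs.foldl max x - xs.foldl min x = 2 ∧ (xs.foldl min x + 1) ∈ x :: xs)) := by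
  by_cases h : xs.foldl max x - xs.foldl min x ≤ 1
  · simp [is_gold_centered_adjacency_easy_alt, h]
  · simp [is_gold_centered_adjacency_easy_alt, h]

-- ===== VERDICT (by name: the statement is the Claim_ definition above) =====
theorem is_gold_centered_adjacency_easy_spec : Claim_equal_is_gold_centered_adjacency_easy := by
  intro s _
  unfold Spec_is_gold_centered_adjacency_easy
  cases s with
  | nil => decide
  | cons x xs =>
    have hiffA := portA_iff (x :: xs)
    have hiffB := portB_iff x xs
    set mn := xs.foldl min x with hmn
    set mx := xs.foldl max x with hmx
    have hminEq : PySem.List.min? (x :: xs) (fun y => y) = some mn :=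
      PySem.List.min?_id_cons x xs
    have hmaxEq : PySem.List.max? (x :: xs) (fun y => y) = some mx :=
      PySem.List.max?_id_cons x xs
    have hmnMem : mn ∈ x :: xs := PySem.List.min?_mem hminEq
    have hmxMem : mx ∈ x :: xs := PySem.List.max?_mem hmaxEq
    have hmnLe : ∀ y ∈ x :: xs, mn ≤ y := PySem.List.min?_isMin hminEq
    have hmxGe : ∀ y ∈ x :: xs, y ≤ mx := PySem.List.max?_isMax hmaxEq
    apply Bool.eq_iff_iff.mpr
    rw [hiffA, hiffB]
    constructor
    · rintro ⟨c, hc, hall⟩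
      have h1 : |c - mn| ≤ 1 := hall mn hmnMem
      have h2 : |c - mx| ≤ 1 := hall mx hmxMem
      have hcmn : mn ≤ c := hmnLe c hc
      have hcmx : c ≤ mx := hmxGe c hc
      by_cases hd : mx - mn ≤ 1
      · exact Or.inl hd
      · right
        have h1' : c - mn ≤ 1 := le_trans (le_abs_self _) h1
        have h2' : mx - c ≤ 1 := by
          have := neg_abs_le (c - mx)
          omega
        have habs1 : c - mn ≤ 1 := h1'
        constructor
        · omega
        · have : c = mn + 1 := by omega
          rwa [← this]
    · rintro (h1 | ⟨h2, hm⟩)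
      · refine ⟨mn, hmnMem, fun o ho => ?_⟩
        have := hmnLe o ho
        have := hmxGe o ho
        rw [abs_le]; omega
      · refine ⟨mn + 1, hm, fun o ho => ?_⟩
        have := hmnLe o ho
        have := hmxGe o ho
        rw [abs_le]; omega
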